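-- pv_equiv track=rewrite | github.com/Chubek/cppcheckdata-shims | examples/format-string-validator/FormatStringValidator.py | _decode_escapes_len
-- ===== SOURCE A (Python) =====
-- def _decode_escapes_len(s: str) -> int:
--     """Count the number of actual bytes when C escape sequences are decoded."""
--     count = 0
--     i = 0
--     while i < len(s):
--         if s[i] == '\\' and i + 1 < len(s):
--             next_c = s[i + 1]
--             if next_c in ('n', 't', 'r', '0', '\\', '"', "'",
--                           'a', 'b', 'f', 'v', '?'):
--                 count += 1
--                 i += 2
--             elif next_c == 'x':
--                 # \xHH — hex escape
--                 count += 1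
--                 i += 2
--                 while i < len(s) and s[i] in '0123456789abcdefABCDEF':
--                     i += 1
--             elif next_c in '01234567':
--                 # Octal escape
--                 count += 1
--                 i += 2
--                 limit = 0
--                 while i < len(s) and s[i] in '01234567' and limit < 2:
--                     i += 1
--                     limit += 1
--             else:
--                 count += 1  # unknown escape, count as 1
--                 i += 2
--         else:
--             count += 1
--             i += 1
--     return count
-- ===== SOURCE B (Python) =====
-- import re
--
-- # One regex tokenizes the string into decoded-byte units; the count of matches
-- # is the decoded length. Alternatives in order: hex escape (unbounded hex run),
-- # octal escape (first digit 1-7, up to 2 more octal digits), escape of any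
-- # single char (simple or unknown alike: 2 chars), a lone trailing backslash,
-- # any other single char (DOTALL so newlines count too).
-- _TOKEN = re.compile(r"\\x[0-9a-fA-F]*|\\[1-7][0-7]{0,2}|\\.|\\|.", re.DOTALL)
--
-- def _decode_escapes_len(s: str) -> int:
--     """Count the number of actual bytes when C escape sequences are decoded."""
--     return len(_TOKEN.findall(s))
-- ===== Notes on version B (the rewrite author's own statement) =====
-- stated objective: idiomatic
-- what changed: Replaces the hand-written index loop with inner skip-loops by a single regex alternation that tokenizes the string into decoded-byte units and returns the match count.
import Mathlib
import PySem

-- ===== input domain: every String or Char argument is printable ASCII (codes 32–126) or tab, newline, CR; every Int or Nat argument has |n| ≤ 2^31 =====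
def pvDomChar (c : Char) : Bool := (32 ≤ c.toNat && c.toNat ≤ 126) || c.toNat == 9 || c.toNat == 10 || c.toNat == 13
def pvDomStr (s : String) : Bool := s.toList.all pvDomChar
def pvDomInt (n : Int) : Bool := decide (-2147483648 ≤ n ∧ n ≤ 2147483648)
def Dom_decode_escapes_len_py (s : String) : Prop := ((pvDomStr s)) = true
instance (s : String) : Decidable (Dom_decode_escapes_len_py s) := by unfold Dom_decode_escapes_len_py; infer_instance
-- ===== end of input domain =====

-- B replaces A's index loop (with inner hex/octal skip loops) by a regex-style
-- tokenizer that matches one decoded-byte unit at a time and counts the matches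
-- (objective: idiomatic; same result on all inputs, both total).

-- ===== PORT A =====
-- Python A: while loop over an index i, inner while loops skipping hex/octal digits.

def pyHexChars : List Char := ['0', '1', '2', '3', '4', '5', '6', '7', '8', '9', 'a', 'b', 'c', 'd', 'e', 'f', 'A', 'B', 'C', 'D', 'E', 'F']
def pyOctChars : List Char := ['0', '1', '2', '3', '4', '5', '6', '7']
def pySimpleChars : List Char := ['n', 't', 'r', '0', '\\', '"', '\'', 'a', 'b', 'f', 'v', '?']

-- inner while: `while i < len(s) and s[i] in '0123456789abcdefABCDEF': i += 1`
def aHexSkip (cs : List Char) (i : Nat) : Nat :=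
  if i < cs.length ∧ cs.getD i ' ' ∈ pyHexChars then
    aHexSkip cs (i + 1)
  else i
termination_by cs.length - i

-- inner while: `while i < len(s) and s[i] in '01234567' and limit < 2: i += 1; limit += 1`
def aOctSkip (cs : List Char) (i : Nat) (limit : Nat) : Nat :=
  if i < cs.length ∧ cs.getD i ' ' ∈ pyOctChars ∧ limit < 2 then
    aOctSkip cs (i + 1) (limit + 1)
  else i
termination_by cs.length - i

theorem aHexSkip_ge (cs : List Char) (i : Nat) : i ≤ aHexSkip cs i := by
  fun_induction aHexSkip cs i with
  | case1 i h ih => omega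
  | case2 i h => omega

theorem aOctSkip_ge (cs : List Char) (i limit : Nat) : i ≤ aOctSkip cs i limit := by
  fun_induction aOctSkip cs i limit with
  | case1 i limit h ih => omega
  | case2 i limit h => omega

-- outer while loop of A
def aLoop (cs : List Char) (count : Int) (i : Nat) : Int :=
  if _h : i < cs.length then
    if cs.getD i ' ' = '\\' ∧ i + 1 < cs.length then
      let next_c := cs.getD (i + 1) ' '
      if next_c ∈ pySimpleChars then
        aLoop cs (count + 1) (i + 2)
      else if next_c = 'x' then
        aLoop cs (count + 1) (aHexSkip cs (i + 2))
      else if next_c ∈ pyOctChars then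
        aLoop cs (count + 1) (aOctSkip cs (i + 2) 0)
      else
        aLoop cs (count + 1) (i + 2)
    else
      aLoop cs (count + 1) (i + 1)
  else count
termination_by cs.length - i
decreasing_by
  · omega
  · have := aHexSkip_ge cs (i + 2); omega
  · have := aOctSkip_ge cs (i + 2) 0; omega
  · omega
  · omega

def decode_escapes_len_py (s : String) : Int := aLoop s.toList 0 0

-- ===== PORT B =====
-- Python B: len(re.findall(r"\\x[0-9a-fA-F]*|\\[1-7][0-7]{0,2}|\\.|\\|.", s, re.DOTALL));
-- the regex is ported by hand as a tokenizer trying the alternatives in order,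
-- with each character class ported as membership in its literal list of characters.

def hexClassB : List Char := ['0', '1', '2', '3', '4', '5', '6', '7', '8', '9', 'a', 'b', 'c', 'd', 'e', 'f', 'A', 'B', 'C', 'D', 'E', 'F']   -- [0-9a-fA-F]
def oct7ClassB : List Char := ['1', '2', '3', '4', '5', '6', '7']                 -- [1-7]
def oct0ClassB : List Char := ['0', '1', '2', '3', '4', '5', '6', '7']                -- [0-7]

def isHexB (c : Char) : Bool := decide (c ∈ hexClassB)
def isOct7B (c : Char) : Bool := decide (c ∈ oct7ClassB)
def isOct0B (c : Char) : Bool := decide (c ∈ oct0ClassB)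

-- greedy [0-9a-fA-F]*
def dropHexB : List Char → List Char
  | [] => []
  | c :: rest => if isHexB c then dropHexB rest else c :: rest

-- greedy [0-7]{0,n}
def dropOctB : Nat → List Char → List Char
  | 0, cs => cs
  | _ + 1, [] => []
  | n + 1, c :: rest => if isOct0B c then dropOctB n rest else c :: rest

-- one regex match at the current position: the alternatives, in the regex's order;
-- returns the remainder after the match (none iff at end of string)
def matchTokB : List Char → Option (List Char)
  | [] => none
  | [_] => some []                                     -- "\\" or "." on the last char
  | c :: d :: rest =>
    if c = '\\' then
      if d = 'x' then some (dropHexB rest)             -- \x[0-9a-fA-F]*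
      else if isOct7B d then some (dropOctB 2 rest)    -- \[1-7][0-7]{0,2}
      else some rest                                   -- \.
    else some (d :: rest)                              -- .


theorem dropHexB_len_le (cs : List Char) : (dropHexB cs).length ≤ cs.length := by
  fun_induction dropHexB cs <;> simp_all
  omega

theorem dropOctB_len_le (n : Nat) (cs : List Char) : (dropOctB n cs).length ≤ cs.length := by
  fun_induction dropOctB n cs <;> simp_all
  omega

theorem matchTokB_len (cs rest : List Char) (h : matchTokB cs = some rest) :
    rest.length < cs.length := by
  match cs with
  | [] => simp [matchTokB] at h
  | [c] =>
    have : rest = [] := by simpa [matchTokB] using h.symm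
    simp [this]
  | c :: d :: tl =>
    simp only [matchTokB] at h
    split_ifs at h with h1 h2 h3
    · cases h
      have := dropHexB_len_le tl
      simp
      omega
    · cases h
      have := dropOctB_len_le 2 tl
      simp
      omega
    · cases h
      simp
    · cases h
      simp

-- count the matches
def bCount (cs : List Char) : Int :=
  match h : matchTokB cs with
  | none => 0
  | some rest => 1 + bCount rest
termination_by cs.length
decreasing_by exact matchTokB_len cs rest h

def decode_escapes_len_py_alt (s : String) : Int := bCount s.toList

-- ===== PRECONDITION & SPEC =====
def Spec_decode_escapes_len_py (s : String) (out : Int) : Prop := out = decode_escapes_len_py_alt s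
instance (s : String) (out : Int) : Decidable (Spec_decode_escapes_len_py s out) := by unfold Spec_decode_escapes_len_py; infer_instance

-- ===== CLAIM (what is proved, stated in full; the proofs are below) =====
def Claim_equal_decode_escapes_len_py : Prop := ∀ (s : String), Dom_decode_escapes_len_py s → Spec_decode_escapes_len_py s (decode_escapes_len_py s)

-- ===== LEMMAS AND PROOFS =====
-- unfolding equations (definitional)
theorem dropHexB_cons (c : Char) (l : List Char) :
    dropHexB (c :: l) = if isHexB c then dropHexB l else c :: l := rfl
theorem dropOctB_cons (n : Nat) (c : Char) (l : List Char) :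
    dropOctB (n + 1) (c :: l) = if isOct0B c then dropOctB n l else c :: l := rfl
theorem matchTokB_one (c : Char) : matchTokB [c] = some [] := rfl
theorem matchTokB_cons (c d : Char) (l : List Char) :
    matchTokB (c :: d :: l) =
      if c = '\\' then
        if d = 'x' then some (dropHexB l)
        else if isOct7B d then some (dropOctB 2 l)
        else some l
      else some (d :: l) := rfl



-- facts about the character classes
theorem hex_all : pyHexChars.all isHexB = true := by decide
theorem hex_mem_isHexB : ∀ c ∈ pyHexChars, isHexB c = true :=
  fun c hc => List.all_eq_true.mp hex_all c hc

theorem simple_all : pySimpleChars.all (fun c => decide (c ≠ 'x' ∧ isOct7B c = false)) = true := by decide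
theorem simple_not_x_oct : ∀ c ∈ pySimpleChars, c ≠ 'x' ∧ isOct7B c = false :=
  fun c hc => of_decide_eq_true (List.all_eq_true.mp simple_all c hc)

theorem oct_all : pyOctChars.all (fun c => decide (c = '0' ∨ isOct7B c = true)) = true := by decide
theorem oct_zero_or_oct7 : ∀ c ∈ pyOctChars, c = '0' ∨ isOct7B c = true :=
  fun c hc => of_decide_eq_true (List.all_eq_true.mp oct_all c hc)

theorem oct7_all : oct7ClassB.all (fun c => decide (c ∈ pyOctChars)) = true := by decide
theorem oct7_mem_oct : ∀ c ∈ oct7ClassB, c ∈ pyOctChars :=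
  fun c hc => of_decide_eq_true (List.all_eq_true.mp oct7_all c hc)

theorem oct_all0 : pyOctChars.all isOct0B = true := by decide
theorem oct_mem_isOct0B : ∀ c ∈ pyOctChars, isOct0B c = true :=
  fun c hc => List.all_eq_true.mp oct_all0 c hc

theorem isHexB_false_of_not_mem {c : Char} (h : c ∉ pyHexChars) : isHexB c = false := by
  simp only [isHexB, decide_eq_false_iff_not]
  exact fun hm => h hm
theorem isOct0B_false_of_not_mem {c : Char} (h : c ∉ pyOctChars) : isOct0B c = false := by
  simp only [isOct0B, decide_eq_false_iff_not]
  exact fun hm => h hm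
theorem isOct7B_false_of_not_mem {c : Char} (h : c ∉ pyOctChars) : isOct7B c = false := by
  simp only [isOct7B, decide_eq_false_iff_not]
  exact fun hm => h (oct7_mem_oct c hm)

theorem drop_cons_of_lt (cs : List Char) (i : Nat) (h : i < cs.length) :
    cs.drop i = cs.getD i ' ' :: cs.drop (i + 1) := by
  rw [List.drop_eq_getElem_cons h, List.getD_eq_getElem cs ' ' h]

theorem drop_cons2 (cs : List Char) (i : Nat) (h : i + 1 < cs.length) :
    cs.drop i = cs.getD i ' ' :: cs.getD (i + 1) ' ' :: cs.drop (i + 2) := by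
  rw [drop_cons_of_lt cs i (by omega), drop_cons_of_lt cs (i + 1) h]

theorem bCount_cons (cs rest : List Char) (h : matchTokB cs = some rest) :
    bCount cs = 1 + bCount rest := by
  rw [bCount]
  split
  · simp_all
  · rename_i r hr
    rw [h] at hr
    cases hr
    rfl

theorem hexSkip_drop (cs : List Char) (i : Nat) :
    cs.drop (aHexSkip cs i) = dropHexB (cs.drop i) := by
  fun_induction aHexSkip cs i with
  | case1 i h ih =>
    obtain ⟨hlt, hmem⟩ := h
    rw [ih, drop_cons_of_lt cs i hlt, dropHexB_cons, if_pos (hex_mem_isHexB _ hmem)]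
  | case2 i h =>
    by_cases hlt : i < cs.length
    · have hmem : cs.getD i ' ' ∉ pyHexChars := fun hm => h ⟨hlt, hm⟩
      rw [drop_cons_of_lt cs i hlt, dropHexB_cons,
        if_neg (by rw [isHexB_false_of_not_mem hmem]; exact Bool.false_ne_true)]
    · rw [List.drop_eq_nil_of_le (by omega)]
      rfl

theorem octSkip_drop (cs : List Char) (i : Nat) (limit : Nat) :
    cs.drop (aOctSkip cs i limit) = dropOctB (2 - limit) (cs.drop i) := by
  fun_induction aOctSkip cs i limit with
  | case1 i limit h ih =>
    obtain ⟨hlt, hmem, hlim⟩ := h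
    obtain ⟨k, hk⟩ : ∃ k, 2 - limit = k + 1 := ⟨1 - limit, by omega⟩
    have hk2 : 2 - (limit + 1) = k := by omega
    rw [ih, hk2, drop_cons_of_lt cs i hlt, hk, dropOctB_cons,
      if_pos (oct_mem_isOct0B _ hmem)]
  | case2 i limit h =>
    by_cases h0 : 2 - limit = 0
    · rw [h0]; rfl
    by_cases hlt : i < cs.length
    · have hmem : cs.getD i ' ' ∉ pyOctChars := fun hm => h ⟨hlt, hm, by omega⟩
      obtain ⟨k, hk⟩ : ∃ k, 2 - limit = k + 1 := ⟨2 - limit - 1, by omega⟩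
      rw [drop_cons_of_lt cs i hlt, hk, dropOctB_cons,
        if_neg (by rw [isOct0B_false_of_not_mem hmem]; exact Bool.false_ne_true)]
    · rw [List.drop_eq_nil_of_le (by omega)]
      obtain ⟨k, hk⟩ : ∃ k, 2 - limit = k + 1 := ⟨2 - limit - 1, by omega⟩
      rw [hk]
      rfl

theorem main_lemma (cs : List Char) (count : Int) (i : Nat) :
    aLoop cs count i = count + bCount (cs.drop i) := by
  fun_induction aLoop cs count i with
  | case1 count i hlt hbs nc hsimp ih =>
    -- simple escape
    obtain ⟨hc, hlt2⟩ := hbs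
    have hs : cs.getD (i + 1) ' ' ∈ pySimpleChars := hsimp
    obtain ⟨hnx, hno⟩ := simple_not_x_oct _ hs
    rw [ih, bCount_cons (cs.drop i) (cs.drop (i + 2))
      (by rw [drop_cons2 cs i hlt2, hc, matchTokB_cons, if_pos rfl, if_neg hnx,
            if_neg (by rw [hno]; exact Bool.false_ne_true)])]
    ring
  | case2 count i hlt hbs nc hsimp hx ih =>
    -- hex escape
    obtain ⟨hc, hlt2⟩ := hbs
    have hx' : cs.getD (i + 1) ' ' = 'x' := hx
    rw [ih, bCount_cons (cs.drop i) (dropHexB (cs.drop (i + 2)))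
        (by rw [drop_cons2 cs i hlt2, hc, hx', matchTokB_cons, if_pos rfl, if_pos rfl]),
      hexSkip_drop cs (i + 2)]
    ring
  | case3 count i hlt hbs nc hsimp hx hoct ih =>
    -- octal escape
    obtain ⟨hc, hlt2⟩ := hbs
    have hs : cs.getD (i + 1) ' ' ∉ pySimpleChars := hsimp
    have hx' : cs.getD (i + 1) ' ' ≠ 'x' := hx
    have ho : cs.getD (i + 1) ' ' ∈ pyOctChars := hoct
    have h7 : isOct7B (cs.getD (i + 1) ' ') = true := by
      rcases oct_zero_or_oct7 _ ho with h0 | h7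
      · exact absurd (show cs.getD (i + 1) ' ' ∈ pySimpleChars by rw [h0]; decide) hs
      · exact h7
    rw [ih, bCount_cons (cs.drop i) (dropOctB 2 (cs.drop (i + 2)))
        (by rw [drop_cons2 cs i hlt2, hc, matchTokB_cons, if_pos rfl, if_neg hx', if_pos h7]),
      octSkip_drop cs (i + 2) 0]
    ring
  | case4 count i hlt hbs nc hsimp hx hoct ih =>
    -- unknown escape
    obtain ⟨hc, hlt2⟩ := hbs
    have hx' : cs.getD (i + 1) ' ' ≠ 'x' := hx
    have ho : cs.getD (i + 1) ' ' ∉ pyOctChars := hoct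
    have h7 : isOct7B (cs.getD (i + 1) ' ') = false := isOct7B_false_of_not_mem ho
    rw [ih, bCount_cons (cs.drop i) (cs.drop (i + 2))
        (by rw [drop_cons2 cs i hlt2, hc, matchTokB_cons, if_pos rfl, if_neg hx',
              if_neg (by rw [h7]; exact Bool.false_ne_true)])]
    ring
  | case5 count i hlt hbs ih =>
    -- ordinary char, or a lone trailing backslash
    by_cases hlt2 : i + 1 < cs.length
    · have hc : cs.getD i ' ' ≠ '\\' := fun hcc => hbs ⟨hcc, hlt2⟩
      rw [ih, bCount_cons (cs.drop i) (cs.drop (i + 1))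
          (by rw [drop_cons_of_lt cs i hlt, drop_cons_of_lt cs (i + 1) hlt2,
                matchTokB_cons, if_neg hc])]
      ring
    · have hone : cs.drop i = [cs.getD i ' '] := by
        rw [drop_cons_of_lt cs i hlt, List.drop_eq_nil_of_le (show cs.length ≤ i + 1 by omega)]
      rw [ih, List.drop_eq_nil_of_le (show cs.length ≤ i + 1 by omega),
        bCount_cons (cs.drop i) [] (by rw [hone, matchTokB_one])]
      ring
  | case6 count i hlt =>
    rw [List.drop_eq_nil_of_le (by omega), bCount]
    simp [matchTokB]

-- ===== VERDICT (by name: the statement is the Claim_ definition above) =====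
theorem decode_escapes_len_py_spec : Claim_equal_decode_escapes_len_py := by
  intro s _
  show decode_escapes_len_py s = decode_escapes_len_py_alt s
  unfold decode_escapes_len_py decode_escapes_len_py_alt
  rw [main_lemma s.toList 0 0]
  simp
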